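-- pv_equiv track=rewrite | github.com/SlaviSotirov/HackBulgaria | week_0/day_1/hack.py | is_hack
-- ===== SOURCE A (Python) =====
-- def is_hack(n):
--     n = bin(n)
--     string = str(n)
--     string = string[2:]
--     if string == string[:: -1]:
--         count = 0
--         for s in string:
--             if s == "1":
--                 count += 1
--         if count % 2 == 1:
--             return True
--     return False
-- ===== SOURCE B (Python) =====
-- def is_hack(n):
--     # Bitwise re-implementation: no strings.  Negative numbers are not
--     # binary palindromes; for n >= 0 build the value of n's bits reversed
--     # and the popcount in one arithmetic loop, then compare.
--     if n < 0:
--         return False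
--     r, count, m = 0, 0, n
--     while m > 0:
--         b = m & 1
--         r = r * 2 + b
--         count += b
--         m >>= 1
--     return r == n and count % 2 == 1
-- ===== Notes on version B (the rewrite author's own statement) =====
-- stated objective: alternative
-- what changed: Replaces bin()-string building, string slicing/reversal and a character-counting loop by one arithmetic loop on the integer itself that accumulates the bit-reversed value and the popcount, comparing the reversed value to n.
import Mathlib
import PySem

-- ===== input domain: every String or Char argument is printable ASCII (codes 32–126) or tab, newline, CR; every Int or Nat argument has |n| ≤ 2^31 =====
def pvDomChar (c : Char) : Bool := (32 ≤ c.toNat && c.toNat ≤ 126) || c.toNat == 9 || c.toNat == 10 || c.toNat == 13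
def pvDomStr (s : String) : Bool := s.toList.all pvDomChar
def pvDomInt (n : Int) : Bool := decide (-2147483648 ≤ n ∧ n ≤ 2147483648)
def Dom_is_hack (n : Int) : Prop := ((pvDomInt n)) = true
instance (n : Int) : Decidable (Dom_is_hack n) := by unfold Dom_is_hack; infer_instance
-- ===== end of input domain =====

-- B replaces A's bin()-string palindrome/count with one arithmetic loop (bit-reversal value + popcount); objective: alternative.


-- ===== PORT A =====
-- binary digits of k, most significant first (empty for 0); mirrors what bin() produces after "0b"
def hackDigits (k : Nat) : List Char :=
  if h : k = 0 then [] else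
    hackDigits (k / 2) ++ [if k % 2 = 1 then '1' else '0']
decreasing_by exact Nat.div_lt_self (Nat.pos_of_ne_zero h) (by norm_num)

-- bin(n) as a character list, ported by hand (exact: sign, "0b" prefix, "0" for zero)
def hackBin (n : Int) : List Char :=
  (if n < 0 then ['-'] else []) ++ ['0', 'b'] ++
    (if n.natAbs = 0 then ['0'] else hackDigits n.natAbs)

def is_hack (n : Int) : Bool :=
  let string := (hackBin n).drop 2          -- string[2:]
  if string = string.reverse then           -- string == string[::-1]
    let count : Int := string.foldl (fun c s => if s = '1' then c + 1 else c) 0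
    if PySem.Int.mod count 2 = 1 then true else false
  else false

-- ===== PORT B =====
-- the while loop of Source B: (r, count) accumulated while m > 0
def hackLoop (m r c : Int) : Int × Int :=
  if h : 0 < m then
    hackLoop (PySem.Int.floordiv m 2) (r * 2 + PySem.Int.mod m 2) (c + PySem.Int.mod m 2)
  else (r, c)
termination_by m.toNat
decreasing_by
  have : PySem.Int.floordiv m 2 = m / 2 := PySem.Int.floordiv_eq_ediv_of_pos (by omega)
  rw [this]; omega

def is_hack_alt (n : Int) : Bool :=
  if n < 0 then false
  else
    let rc := hackLoop n 0 0
    (rc.1 == n) && (PySem.Int.mod rc.2 2 == 1)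

-- ===== PRECONDITION & SPEC =====
def Spec_is_hack (n : Int) (out : Bool) : Prop := out = is_hack_alt n
instance (n : Int) (out : Bool) : Decidable (Spec_is_hack n out) := by unfold Spec_is_hack; infer_instance

-- ===== CLAIM (what is proved, stated in full; the proofs are below) =====
def Claim_equal_is_hack : Prop := ∀ (n : Int), Dom_is_hack n → Spec_is_hack n (is_hack n)

-- ===== LEMMAS AND PROOFS =====

def hackBitv (c : Char) : Nat := if c = '1' then 1 else 0
def hackVal (l : List Char) : Nat := l.foldl (fun a c => 2 * a + hackBitv c) 0

theorem hackVal_shift (l : List Char) : ∀ a : Nat,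
    l.foldl (fun a c => 2 * a + hackBitv c) a = a * 2 ^ l.length + hackVal l := by
  induction l with
  | nil => intro a; simp [hackVal]
  | cons c t ih =>
      intro a
      simp only [List.foldl_cons, hackVal, List.length_cons]
      rw [ih (2 * a + hackBitv c), ih (2 * 0 + hackBitv c)]
      ring

theorem hackVal_append (l : List Char) (b : Char) :
    hackVal (l ++ [b]) = 2 * hackVal l + hackBitv b := by
  simp [hackVal, List.foldl_append]

theorem hackVal_cons (c : Char) (t : List Char) :
    hackVal (c :: t) = hackBitv c * 2 ^ t.length + hackVal t := by
  have h := hackVal_shift t (2 * 0 + hackBitv c)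
  simp only [hackVal, List.foldl_cons] at h ⊢
  rw [h]
  set X := List.foldl (fun a c => 2 * a + hackBitv c) 0 t with hX
  set P := 2 ^ t.length with hP
  ring

theorem hackDigits_bits (k : Nat) : ∀ c ∈ hackDigits k, c = '0' ∨ c = '1' := by
  induction k using Nat.strong_induction_on with
  | _ k ih =>
    rw [hackDigits]
    split
    · simp
    · next h =>
      intro c hc
      rcases List.mem_append.mp hc with h1 | h1
      · exact ih _ (Nat.div_lt_self (Nat.pos_of_ne_zero h) (by norm_num)) c h1
      · simp at h1; subst h1; split <;> simp

theorem hackDigits_ne_nil (k : Nat) (h : k ≠ 0) : hackDigits k ≠ [] := by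
  rw [hackDigits]; simp [h]

theorem hackVal_digits (k : Nat) : hackVal (hackDigits k) = k := by
  induction k using Nat.strong_induction_on with
  | _ k ih =>
    rw [hackDigits]
    split
    · next h => simp [hackVal, h]
    · next h =>
      rw [hackVal_append, ih _ (Nat.div_lt_self (Nat.pos_of_ne_zero h) (by norm_num))]
      have : hackBitv (if k % 2 = 1 then '1' else '0') = k % 2 := by
        rcases Nat.mod_two_eq_zero_or_one k with h2 | h2 <;> simp [h2, hackBitv]
      rw [this]; omega

theorem hackVal_lt (l : List Char) (hb : ∀ c ∈ l, c = '0' ∨ c = '1') :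
    hackVal l < 2 ^ l.length := by
  induction l with
  | nil => simp [hackVal]
  | cons c t ih =>
      have hc := hb c (by simp)
      have ht : hackVal t < 2 ^ t.length := ih (fun x hx => hb x (by simp [hx]))
      rw [hackVal_cons]
      have : hackBitv c ≤ 1 := by rcases hc with h | h <;> simp [h, hackBitv]
      simp only [List.length_cons, pow_succ]
      nlinarith [ht]

theorem hackVal_inj (l₁ : List Char) : ∀ l₂ : List Char,
    (∀ c ∈ l₁, c = '0' ∨ c = '1') → (∀ c ∈ l₂, c = '0' ∨ c = '1') →
    l₁.length = l₂.length → hackVal l₁ = hackVal l₂ → l₁ = l₂ := by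
  induction l₁ with
  | nil => intro l₂ _ _ hl _; cases l₂ <;> simp_all
  | cons c t ih =>
      intro l₂ hb1 hb2 hl hv
      cases l₂ with
      | nil => simp at hl
      | cons d u =>
        have hlen : t.length = u.length := by simpa using hl
        have e1 := hackVal_cons c t
        have e2 := hackVal_cons d u
        have ht : hackVal t < 2 ^ t.length := hackVal_lt t (fun x hx => hb1 x (by simp [hx]))
        have hu : hackVal u < 2 ^ u.length := hackVal_lt u (fun x hx => hb2 x (by simp [hx]))
        have hc := hb1 c (by simp)
        have hd := hb2 d (by simp)
        have hbvc : hackBitv c ≤ 1 := by rcases hc with h | h <;> simp [h, hackBitv]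
        have hbvd : hackBitv d ≤ 1 := by rcases hd with h | h <;> simp [h, hackBitv]
        rw [e1, e2, hlen] at hv
        have hbeq : hackBitv c = hackBitv d := by
          rcases Nat.lt_or_ge (hackBitv c) (hackBitv d) with h | h
          · exfalso; rw [hlen] at ht; nlinarith
          · rcases Nat.lt_or_ge (hackBitv d) (hackBitv c) with h' | h'
            · exfalso; rw [hlen] at ht; nlinarith
            · omega
        have hcd : c = d := by
          rcases hc with h1 | h1 <;> rcases hd with h2 | h2 <;>
            simp [h1, h2, hackBitv] at hbeq ⊢
        have hveq : hackVal t = hackVal u := by rw [hbeq] at hv; omega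
        rw [hcd, ih u (fun x hx => hb1 x (by simp [hx])) (fun x hx => hb2 x (by simp [hx])) hlen hveq]

theorem hackCount_foldl (l : List Char) : ∀ a : Int,
    l.foldl (fun c s => if s = '1' then c + 1 else c) a = a + l.count '1' := by
  induction l with
  | nil => intro a; simp
  | cons c t ih =>
      intro a
      simp only [List.foldl_cons, List.count_cons, ih]
      by_cases h : c = '1' <;> simp [h] <;> push_cast <;> ring

-- characterization of Source B's loop on a natural-number argument
theorem hackLoop_eq (k : Nat) : ∀ r c : Int,
    hackLoop (k : Int) r c =
      (r * 2 ^ (hackDigits k).length + ((hackVal (hackDigits k).reverse : Nat) : Int),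
       c + ((hackDigits k).count '1' : Int)) := by
  induction k using Nat.strong_induction_on with
  | _ k ih =>
    intro r c
    rw [hackLoop]
    by_cases hk : k = 0
    · subst hk; simp [hackDigits, hackVal]
    · have hpos : (0 : Int) < (k : Int) := by exact_mod_cast Nat.pos_of_ne_zero hk
      rw [dif_pos hpos]
      have hfd : PySem.Int.floordiv (k : Int) 2 = ((k / 2 : Nat) : Int) := by
        exact_mod_cast PySem.Int.floordiv_natCast k 2
      have hmd : PySem.Int.mod (k : Int) 2 = ((k % 2 : Nat) : Int) := by
        exact_mod_cast PySem.Int.mod_natCast k 2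
      rw [hfd, hmd, ih (k / 2) (Nat.div_lt_self (Nat.pos_of_ne_zero hk) (by norm_num))]
      -- unfold digits of k once
      have hd : hackDigits k = hackDigits (k / 2) ++ [if k % 2 = 1 then '1' else '0'] := by
        rw [hackDigits]; simp [hk]
      set b : Char := if k % 2 = 1 then '1' else '0' with hb
      have hbv : (hackBitv b : Int) = ((k % 2 : Nat) : Int) := by
        rcases Nat.mod_two_eq_zero_or_one k with h2 | h2 <;> simp [hb, h2, hackBitv]
      rw [Prod.mk.injEq]
      refine ⟨?_, ?_⟩
      · -- r component
        rw [hd]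
        simp only [List.reverse_append, List.reverse_singleton, List.length_append,
          List.length_singleton, List.singleton_append]
        rw [hackVal_cons, List.length_reverse]
        push_cast
        rw [hbv]
        push_cast
        ring
      · -- count component
        rw [hd]
        rcases Nat.mod_two_eq_zero_or_one k with h2 | h2 <;>
          simp [hb, h2, List.count_append] <;> push_cast <;> ring

-- ===== VERDICT (by name: the statement is the Claim_ definition above) =====
theorem is_hack_spec : Claim_equal_is_hack := by
  intro n _
  unfold Spec_is_hack is_hack is_hack_alt hackBin
  by_cases hneg : n < 0
  · -- A: string = 'b' :: digits, never a palindrome; B: the n < 0 guard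
    have hk : n.natAbs ≠ 0 := by omega
    rw [if_pos hneg, if_pos hneg, if_neg hk]
    have hdrop : ((['-'] ++ ['0', 'b'] ++ hackDigits n.natAbs)).drop 2
        = 'b' :: hackDigits n.natAbs := by simp
    rw [hdrop]
    have hne : ('b' :: hackDigits n.natAbs) ≠ ('b' :: hackDigits n.natAbs).reverse := by
      intro heq
      rw [List.reverse_cons] at heq
      cases hrev : (hackDigits n.natAbs).reverse with
      | nil =>
          exact hackDigits_ne_nil _ hk (by simpa using congrArg List.reverse hrev)
      | cons x t =>
          rw [hrev] at heq
          have hx : x ∈ hackDigits n.natAbs := by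
            have : x ∈ (hackDigits n.natAbs).reverse := by rw [hrev]; simp
            simpa using this
          have hms := hackDigits_bits n.natAbs x hx
          have hbx : 'b' = x := by
            have := congrArg (fun l => l.head?) heq
            simpa using this
          rcases hms with h | h <;> rw [← hbx] at h <;> exact absurd h (by decide)
    rw [if_neg hne]
  · -- n ≥ 0
    rw [if_neg hneg, if_neg hneg]
    have hn0 : 0 ≤ n := by omega
    obtain ⟨k, hkn⟩ := Int.eq_ofNat_of_zero_le hn0
    subst hkn
    by_cases hk : k = 0
    · subst hk
      rw [hackLoop]
      norm_num
      decide
    · have habs : ¬ (((k : Int)).natAbs = 0) := by simpa using hk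
      rw [if_neg habs]
      have hdrop : (([] : List Char) ++ ['0', 'b'] ++ hackDigits k).drop 2
          = hackDigits k := by simp
      simp only [Int.natAbs_natCast, hdrop]
      rw [hackLoop_eq k 0 0]
      simp only [zero_mul, zero_add]
      rw [hackCount_foldl (hackDigits k) 0]
      -- palindrome check ↔ reversed value equals k
      have hiff : (hackDigits k = (hackDigits k).reverse) ↔
          ((hackVal (hackDigits k).reverse : Nat) : Int) = ((k : Nat) : Int) := by
        constructor
        · intro h; rw [← h, hackVal_digits]
        · intro h
          have hval : hackVal (hackDigits k).reverse = k := by exact_mod_cast h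
          exact hackVal_inj (hackDigits k) (hackDigits k).reverse
            (hackDigits_bits k) (fun c hc => hackDigits_bits k c (by simpa using hc))
            (by simp) (by rw [hackVal_digits, hval])
      by_cases hpal : hackDigits k = (hackDigits k).reverse
      · rw [if_pos hpal]
        have hr : ((hackVal (hackDigits k).reverse : Nat) : Int) = ((k : Nat) : Int) :=
          hiff.mp hpal
        simp only [hr, beq_self_eq_true, Bool.true_and]
        rw [Bool.eq_iff_iff]
        simp
      · rw [if_neg hpal]
        have hr : ¬ ((hackVal (hackDigits k).reverse : Nat) : Int) = ((k : Nat) : Int) :=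
          fun h => hpal (hiff.mpr h)
        simp [hr]
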